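-- pv_equiv track=rewrite | github.com/faizz-167/speech-therapy-final | server/app/ml/spacy_disfluency.py | _count_phrase_matches
-- ===== SOURCE A (Python) =====
-- def _count_phrase_matches(words: list[str], phrases: set[tuple[str, ...]]) -> int:
--     count = 0
--     for phrase in phrases:
--         size = len(phrase)
--         if size == 0 or len(words) < size:
--             continue
--         count += sum(1 for idx in range(len(words) - size + 1) if tuple(words[idx:idx + size]) == phrase)
--     return count
-- ===== SOURCE B (Python) =====
-- def _count_phrase_matches(words, phrases):
--     n = len(words)
--     sizes = {len(p) for p in phrases if p}
--     total = 0
--     for i in range(n):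
--         for size in sizes:
--             if i + size <= n and tuple(words[i:i + size]) in phrases:
--                 total += 1
--     return total
-- ===== Notes on version B (the rewrite author's own statement) =====
-- stated objective: faster
-- what changed: Instead of scanning every window of words once per phrase, B collects the distinct phrase lengths into a set and slides one window per distinct length over the words, testing each window by set membership.
import Mathlib
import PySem

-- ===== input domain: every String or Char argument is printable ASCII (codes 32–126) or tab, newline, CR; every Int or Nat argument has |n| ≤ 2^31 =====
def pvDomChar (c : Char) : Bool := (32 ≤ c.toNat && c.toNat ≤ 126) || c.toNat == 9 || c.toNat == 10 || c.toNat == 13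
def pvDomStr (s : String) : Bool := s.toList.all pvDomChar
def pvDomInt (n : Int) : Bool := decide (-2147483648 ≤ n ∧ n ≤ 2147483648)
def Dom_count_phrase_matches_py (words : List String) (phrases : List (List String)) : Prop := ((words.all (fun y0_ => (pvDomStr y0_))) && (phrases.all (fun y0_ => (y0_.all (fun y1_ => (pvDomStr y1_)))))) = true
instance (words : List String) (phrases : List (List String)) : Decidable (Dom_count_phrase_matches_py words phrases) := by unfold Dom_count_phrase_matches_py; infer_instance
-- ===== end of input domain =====

-- B replaces A's scan of every window per phrase by one sliding pass per DISTINCT phrase length with a set lookup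
-- (O(n·distinct_sizes·size) instead of O(n·|phrases|·size)); measurably faster when many phrases share a length.

-- ===== PORT A =====
def count_phrase_matches_py (words : List String) (phrases : List (List String)) : Int :=
  phrases.foldl (fun count phrase =>
    let size : Int := (phrase.length : Int)
    if size = 0 ∨ (words.length : Int) < size then count
    else count + ((PySem.List.pyRange 0 ((words.length : Int) - size + 1) 1).map
        (fun idx => if PySem.List.slice words (some idx) (some (idx + size)) = phrase
                    then (1 : Int) else 0)).sum) 0

-- ===== PORT B =====
def count_phrase_matches_py_alt (words : List String) (phrases : List (List String)) : Int :=
  let n : Int := (words.length : Int)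
  let sizes : List Int := PySem.Set.ofList ((phrases.filter (fun p => p ≠ [])).map (fun p => (p.length : Int)))
  (PySem.List.pyRange 0 n 1).foldl (fun total i =>
    sizes.foldl (fun total size =>
      if i + size ≤ n ∧ PySem.List.slice words (some i) (some (i + size)) ∈ phrases
      then total + 1 else total) total) 0

-- ===== PRECONDITION & SPEC =====
-- Python's `phrases` parameter is a set of tuples; per the type convention the list holds its DISTINCT
-- elements, so Pre_ states exactly that (a list with duplicate phrases represents no Python input).
def Pre_count_phrase_matches_py (words : List String) (phrases : List (List String)) : Prop :=
  phrases.Nodup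
instance (words : List String) (phrases : List (List String)) : Decidable (Pre_count_phrase_matches_py words phrases) := by unfold Pre_count_phrase_matches_py; infer_instance

def pvWitness_count_phrase_matches_py : List String × List (List String) :=
  (["a", "b", "a"], [["a"], ["a", "b"], ["c"]])

def Spec_count_phrase_matches_py (words : List String) (phrases : List (List String)) (out : Int) : Prop := out = count_phrase_matches_py_alt words phrases
instance (words : List String) (phrases : List (List String)) (out : Int) : Decidable (Spec_count_phrase_matches_py words phrases out) := by unfold Spec_count_phrase_matches_py; infer_instance

-- ===== CLAIM (what is proved, stated in full; the proofs are below) =====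
def Claim_equal_count_phrase_matches_py : Prop := ∀ (words : List String) (phrases : List (List String)), Dom_count_phrase_matches_py words phrases → Pre_count_phrase_matches_py words phrases → Spec_count_phrase_matches_py words phrases (count_phrase_matches_py words phrases)

-- ===== LEMMAS AND PROOFS =====

-- the indicator "phrase p matches words at position i" (1/0), shared shape of both sums
def pvInd (words : List String) (p : List String) (i : Int) : Int :=
  if p ≠ [] ∧ i + (p.length : Int) ≤ (words.length : Int) ∧
      PySem.List.slice words (some i) (some (i + (p.length : Int))) = p then 1 else 0

-- A's per-phrase contribution
def pvG (words : List String) (p : List String) : Int :=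
  if (p.length : Int) = 0 ∨ (words.length : Int) < (p.length : Int) then 0
  else ((PySem.List.pyRange 0 ((words.length : Int) - (p.length : Int) + 1) 1).map
        (fun idx => if PySem.List.slice words (some idx) (some (idx + (p.length : Int))) = p
                    then (1 : Int) else 0)).sum

-- B's per-position, per-size contribution
def pvF (words : List String) (phrases : List (List String)) (i s : Int) : Int :=
  if i + s ≤ (words.length : Int) ∧ PySem.List.slice words (some i) (some (i + s)) ∈ phrases
  then 1 else 0

lemma pv_toFinset_map {α β : Type} [DecidableEq α] [DecidableEq β] (l : List α) (f : α → β) :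
    (l.map f).toFinset = Finset.image f l.toFinset := by
  induction l with
  | nil => simp
  | cons a t ih => simp [ih]

lemma pv_sum_swap {α β : Type} (l : List α) (m : List β) (f : α → β → Int) :
    (l.map (fun i => (m.map (f i)).sum)).sum = (m.map (fun p => (l.map (fun i => f i p)).sum)).sum := by
  induction l with
  | nil => simp
  | cons a t ih =>
      simp only [List.map_cons, List.sum_cons, ih]
      rw [← PySem.List.sum_map_add_int]

lemma pv_A_eq_sum (words : List String) (phrases : List (List String)) :
    count_phrase_matches_py words phrases = (phrases.map (pvG words)).sum := by
  unfold count_phrase_matches_py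
  have h : (fun (count : Int) (phrase : List String) =>
      let size : Int := (phrase.length : Int)
      if size = 0 ∨ (words.length : Int) < size then count
      else count + ((PySem.List.pyRange 0 ((words.length : Int) - size + 1) 1).map
          (fun idx => if PySem.List.slice words (some idx) (some (idx + size)) = phrase
                      then (1 : Int) else 0)).sum)
      = (fun (count : Int) (phrase : List String) => count + pvG words phrase) := by
    funext c p
    simp only [pvG]
    split_ifs <;> simp
  rw [h, PySem.List.foldl_add, zero_add]

lemma pv_B_eq_sum (words : List String) (phrases : List (List String)) :
    count_phrase_matches_py_alt words phrases
      = ((PySem.List.pyRange 0 (words.length : Int) 1).map (fun i =>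
          ((PySem.Set.ofList ((phrases.filter (fun p => p ≠ [])).map (fun p => (p.length : Int)))).map
            (pvF words phrases i)).sum)).sum := by
  unfold count_phrase_matches_py_alt
  have hinner : ∀ (i t0 : Int) (sz : List Int),
      sz.foldl (fun total size =>
        if i + size ≤ (words.length : Int) ∧
            PySem.List.slice words (some i) (some (i + size)) ∈ phrases
        then total + 1 else total) t0
      = t0 + (sz.map (pvF words phrases i)).sum := by
    intro i t0 sz
    have h : (fun (total size : Int) =>
        if i + size ≤ (words.length : Int) ∧
            PySem.List.slice words (some i) (some (i + size)) ∈ phrases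
        then total + 1 else total)
        = (fun (total size : Int) => total + pvF words phrases i size) := by
      funext t s
      simp only [pvF]
      split_ifs <;> simp
    rw [h, PySem.List.foldl_add]
  simp only [hinner]
  rw [PySem.List.foldl_add, zero_add]

lemma pv_win_length (words : List String) (i s : Int) (h0 : 0 ≤ i) (hs : 0 ≤ s)
    (hn : i + s ≤ (words.length : Int)) :
    ((PySem.List.slice words (some i) (some (i + s))).length : Int) = s := by
  rw [PySem.List.slice_toNat words h0 (by omega)]
  simp only [List.length_take, List.length_drop]
  omega

-- A's per-phrase count equals the sum of the match indicator over all positions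
lemma pv_phrase_sum (words : List String) (p : List String) :
    pvG words p = ((PySem.List.pyRange 0 (words.length : Int) 1).map (pvInd words p)).sum := by
  by_cases hp : p = []
  · subst hp
    rw [pvG, if_pos (Or.inl (by simp))]
    refine (List.sum_eq_zero ?_).symm
    intro x hx
    obtain ⟨i, -, rfl⟩ := List.mem_map.mp hx
    simp [pvInd]
  · by_cases hn : (words.length : Int) < (p.length : Int)
    · rw [pvG, if_pos (Or.inr hn)]
      refine (List.sum_eq_zero ?_).symm
      intro x hx
      obtain ⟨i, hi, rfl⟩ := List.mem_map.mp hx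
      have := PySem.List.mem_pyRange_one.mp hi
      rw [pvInd, if_neg]
      rintro ⟨-, h2, -⟩
      omega
    · push Not at hn
      have hp1 : (1 : Int) ≤ (p.length : Int) := by
        have : p.length ≠ 0 := fun h => hp (List.eq_nil_of_length_eq_zero h)
        omega
      set n : Int := (words.length : Int) with hndef
      set s : Int := (p.length : Int) with hsdef
      rw [pvG, if_neg (by omega)]
      rw [PySem.List.pyRange_one_append 0 (n - s + 1) n (by omega) (by omega),
        List.map_append, List.sum_append]
      have h2 : ((PySem.List.pyRange (n - s + 1) n 1).map (pvInd words p)).sum = 0 := by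
        refine List.sum_eq_zero ?_
        intro x hx
        obtain ⟨i, hi, rfl⟩ := List.mem_map.mp hx
        have := PySem.List.mem_pyRange_one.mp hi
        rw [pvInd, if_neg]
        rintro ⟨-, h2, -⟩
        omega
      rw [h2, add_zero]
      refine congrArg List.sum (List.map_congr_left ?_)
      intro i hi
      have hmem := PySem.List.mem_pyRange_one.mp hi
      rw [pvInd]
      by_cases he : PySem.List.slice words (some i) (some (i + (p.length : Int))) = p
      · rw [if_pos he, if_pos ⟨hp, by omega, he⟩]
      · rw [if_neg he, if_neg (by rintro ⟨-, -, h⟩; exact he h)]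

-- the crux: at a fixed position, summing the set lookup over the distinct sizes
-- equals summing the match indicator over the phrases (needs Nodup)
lemma pv_crux (words : List String) (phrases : List (List String)) (hnd : phrases.Nodup)
    (i : Int) (h0 : 0 ≤ i) :
    ((PySem.Set.ofList ((phrases.filter (fun p => p ≠ [])).map (fun p => (p.length : Int)))).map
      (pvF words phrases i)).sum
    = (phrases.map (fun p => pvInd words p i)).sum := by
  set q : List (List String) := phrases.filter (fun p => p ≠ []) with hq
  set sz : List Int := PySem.Set.ofList (q.map (fun p => (p.length : Int))) with hsz
  -- move both sides to Finset sums
  have hndq : q.Nodup := hnd.filter _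
  have hndsz : sz.Nodup := PySem.Set.nodup_ofList _
  rw [← List.sum_toFinset _ hndsz, ← List.sum_toFinset _ hnd]
  have hszF : sz.toFinset = Finset.image (fun p => (p.length : Int)) q.toFinset := by
    have h1 : sz.toFinset = (q.map (fun p => (p.length : Int))).toFinset := by
      apply Finset.ext
      intro x
      simp [hsz, PySem.Set.mem_ofList]
    rw [h1, pv_toFinset_map]
  -- restrict the phrase sum to nonempty phrases
  have hrestr : ∑ p ∈ phrases.toFinset, pvInd words p i = ∑ p ∈ q.toFinset, pvInd words p i := by
    rw [hq, List.toFinset_filter]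
    rw [Finset.sum_filter]
    refine Finset.sum_congr rfl ?_
    intro p hp
    by_cases hpe : p = []
    · simp [hpe, pvInd]
    · simp [hpe]
  rw [hrestr, hszF]
  refine Finset.sum_image' _ ?_
  intro c hc
  have hcq : c ∈ q := List.mem_toFinset.mp hc
  have hcne : c ≠ [] := by
    have := List.of_mem_filter hcq
    simpa using this
  have hc1 : (1 : Int) ≤ (c.length : Int) := by
    have : c.length ≠ 0 := fun h => hcne (List.eq_nil_of_length_eq_zero h)
    omega
  set s : Int := (c.length : Int) with hsdef
  by_cases hfit : i + s ≤ (words.length : Int)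
  · -- window exists; the lookup is an indicator of membership in the fibre
    set w : List String := PySem.List.slice words (some i) (some (i + s)) with hw
    have hwlen : ((w.length : Int)) = s := pv_win_length words i s h0 (by omega) hfit
    have hterm : ∀ p ∈ q.toFinset.filter (fun p => (p.length : Int) = s),
        pvInd words p i = if w = p then 1 else 0 := by
      intro p hp
      obtain ⟨hpq, hps⟩ := Finset.mem_filter.mp hp
      have hpne : p ≠ [] := by
        have := List.of_mem_filter (List.mem_toFinset.mp hpq)
        simpa using this
      rw [pvInd]
      by_cases he : w = p
      · rw [if_pos ⟨hpne, by rw [hps]; exact hfit, by rw [hps, ← hw, he]⟩, if_pos he]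
      · rw [if_neg, if_neg he]
        rintro ⟨-, -, h3⟩
        exact he (by rw [← h3, hps, hw])
    rw [Finset.sum_congr rfl hterm, Finset.sum_ite_eq]
    have hwne : w ≠ [] := by
      intro h
      rw [h] at hwlen
      simp at hwlen
      omega
    have hmemiff : (w ∈ q.toFinset.filter (fun p => (p.length : Int) = s)) ↔ w ∈ phrases := by
      constructor
      · intro h
        exact List.mem_of_mem_filter (List.mem_toFinset.mp (Finset.mem_filter.mp h).1)
      · intro h
        refine Finset.mem_filter.mpr ⟨List.mem_toFinset.mpr ?_, hwlen⟩
        rw [hq]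
        exact List.mem_filter.mpr ⟨h, by simpa using hwne⟩
    rw [pvF]
    by_cases hwp : w ∈ phrases
    · rw [if_pos ⟨hfit, hwp⟩, if_pos (hmemiff.mpr hwp)]
    · rw [if_neg (by rintro ⟨-, h⟩; exact hwp h), if_neg (fun h => hwp (hmemiff.mp h))]
  · -- the window does not fit: both sides vanish
    rw [pvF, if_neg (by rintro ⟨h1, -⟩; exact hfit h1)]
    refine (Finset.sum_eq_zero ?_).symm
    intro p hp
    obtain ⟨-, hps⟩ := Finset.mem_filter.mp hp
    rw [pvInd, if_neg]
    rintro ⟨-, h2, -⟩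
    rw [hps] at h2
    exact hfit h2

-- ===== VERDICT (by name: the statement is the Claim_ definition above) =====
theorem count_phrase_matches_py_spec : Claim_equal_count_phrase_matches_py := by
  intro words phrases _hdom hnd
  unfold Spec_count_phrase_matches_py
  rw [pv_A_eq_sum, pv_B_eq_sum]
  have hcrux : ∀ i ∈ PySem.List.pyRange 0 (words.length : Int) 1,
      ((PySem.Set.ofList ((phrases.filter (fun p => p ≠ [])).map (fun p => (p.length : Int)))).map
        (pvF words phrases i)).sum = (phrases.map (fun p => pvInd words p i)).sum := by
    intro i hi
    exact pv_crux words phrases hnd i (PySem.List.mem_pyRange_one.mp hi).1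
  rw [List.map_congr_left hcrux, pv_sum_swap]
  refine (congrArg List.sum (List.map_congr_left ?_)).symm
  intro p _
  exact (pv_phrase_sum words p).symm
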